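-- pv_equiv track=rewrite | github.com/gka0903/Coding_Test | 2022/2022.12/2022.12.08/[1차]비밀지도.py | solution
-- ===== SOURCE A (Python) =====
-- def solution(n, arr1, arr2):
--     arr = []
--     answer = []
--     for i in range(len(arr1)):
--         num = format(arr1[i] | arr2[i], 'b')
--         if len(num) < n:
--             num = '0' * (n - len(num)) + num
--         arr.append(num)
--     for i in arr:
--         new_arr = i.replace('1', '#')
--         new_arr = new_arr.replace('0', ' ')
--         answer.append(new_arr)
--     return answer
-- ===== SOURCE B (Python) =====
-- def render(v):
--     """Binary digits of v, most significant first, drawn as '#' for 1 and ' ' for 0."""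
--     if v < 0:
--         return '-' + render(-v)
--     sym = '#' if v % 2 else ' '
--     return sym if v < 2 else render(v // 2) + sym
--
--
-- def solution(n, arr1, arr2):
--     return [render(a | b).rjust(n) for a, b in zip(arr1, arr2)]
-- ===== Notes on version B (the rewrite author's own statement) =====
-- stated objective: simpler
-- what changed: B renders each row with a small recursive digit function that emits '#'/' ' directly from v % 2 while halving v = arr1[i]|arr2[i], then right-justifies with spaces, replacing A's format-string, manual zero-padding and two replace passes.
import Mathlib
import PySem

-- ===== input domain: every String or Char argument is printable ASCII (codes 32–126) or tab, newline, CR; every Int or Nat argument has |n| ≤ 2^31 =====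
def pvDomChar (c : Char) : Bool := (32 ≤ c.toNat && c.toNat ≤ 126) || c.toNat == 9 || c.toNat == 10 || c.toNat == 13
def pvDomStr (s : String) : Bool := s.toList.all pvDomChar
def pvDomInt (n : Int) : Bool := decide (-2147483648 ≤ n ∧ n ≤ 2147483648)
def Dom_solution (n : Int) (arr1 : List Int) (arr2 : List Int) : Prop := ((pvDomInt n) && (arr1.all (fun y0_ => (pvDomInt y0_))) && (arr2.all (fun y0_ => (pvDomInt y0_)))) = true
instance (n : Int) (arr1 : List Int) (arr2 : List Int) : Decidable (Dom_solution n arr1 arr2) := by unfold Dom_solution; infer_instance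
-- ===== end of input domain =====

-- B renders each row with a small recursive digit function ('#'/' ' from v % 2 while halving
-- v = arr1[i] | arr2[i]) and a space right-justification, replacing A's format-string,
-- manual zero-padding and two replace passes.


-- ===== PORT A =====
-- literal port of A: rows as List Char, Python str ops via PySem.Chars/Int
def solution (n : Int) (arr1 : List Int) (arr2 : List Int) : List String :=
  let arr : List (List Char) :=
    (PySem.List.pyRange 0 (PySem.List.len arr1) 1).foldl (fun acc i =>
      let num := PySem.Int.toBinChars
        (PySem.Int.bor (PySem.List.pyGetD arr1 i 0) (PySem.List.pyGetD arr2 i 0))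
      let num := if (num.length : Int) < n then
          List.replicate (n - (num.length : Int)).toNat '0' ++ num else num
      acc ++ [num]) []
  arr.foldl (fun answer i =>
    let s := PySem.Chars.replace i ['1'] ['#']
    let s := PySem.Chars.replace s ['0'] [' ']
    answer ++ [String.mk s]) []

-- ===== PORT B =====
-- render(v): binary digits of v, most significant first, '#' for 1 and ' ' for 0
def render (v : Int) : List Char :=
  if h : v < 0 then '-' :: render (-v)
  else
    let sym := if PySem.Int.mod v 2 ≠ 0 then '#' else ' '
    if h2 : v < 2 then [sym] else render (PySem.Int.floordiv v 2) ++ [sym]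
  termination_by 2 * v.natAbs + (if v < 0 then 1 else 0)
  decreasing_by
  · simp only [Int.natAbs_neg]
    have hnn : ¬ (-v < 0) := by omega
    simp only [h, hnn, if_true, if_false]
    omega
  · rw [PySem.Int.floordiv_eq_ediv_of_pos (by omega : (0:Int) < 2)]
    have hd : ¬ (v / 2 < 0) := by omega
    simp only [h, hd, if_false]
    omega

def solution_alt (n : Int) (arr1 : List Int) (arr2 : List Int) : List String :=
  (arr1.zip arr2).map (fun p =>
    let row := render (PySem.Int.bor p.1 p.2)
    String.mk (List.replicate (n - (row.length : Int)).toNat ' ' ++ row))  -- rjust(n)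

-- ===== PRECONDITION & SPEC =====
-- Pre_ excludes only the inputs where arr2 is shorter than arr1, on which A raises IndexError at arr2[i].
def Pre_solution (n : Int) (arr1 : List Int) (arr2 : List Int) : Prop :=
  arr1.length ≤ arr2.length
instance (n : Int) (arr1 : List Int) (arr2 : List Int) : Decidable (Pre_solution n arr1 arr2) := by
  unfold Pre_solution; infer_instance
def pvWitness_solution : Int × List Int × List Int := (3, [9, 4], [6, 1])

def Spec_solution (n : Int) (arr1 : List Int) (arr2 : List Int) (out : List String) : Prop := out = solution_alt n arr1 arr2
instance (n : Int) (arr1 : List Int) (arr2 : List Int) (out : List String) : Decidable (Spec_solution n arr1 arr2 out) := by unfold Spec_solution; infer_instance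

-- ===== CLAIM (what is proved, stated in full; the proofs are below) =====
def Claim_equal_solution : Prop := ∀ (n : Int) (arr1 : List Int) (arr2 : List Int), Dom_solution n arr1 arr2 → Pre_solution n arr1 arr2 → Spec_solution n arr1 arr2 (solution n arr1 arr2)

-- ===== LEMMAS AND PROOFS =====

-- the symbol A's two replaces make out of one char
def trChar (c : Char) : Char := if c = '1' then '#' else if c = '0' then ' ' else c

-- the binary numeral of m, most significant digit first (the shape of Nat.toDigits 2)
def pvBin (m : Nat) : List Char :=
  if h : m < 2 then [Nat.digitChar m]
  else pvBin (m / 2) ++ [Nat.digitChar (m % 2)]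
  decreasing_by exact Nat.div_lt_self (by omega) (by omega)

theorem pvBin_lt (m : Nat) (h : m < 2) : pvBin m = [Nat.digitChar m] := by
  rw [pvBin, dif_pos h]

theorem pvBin_two (m : Nat) (h : 2 ≤ m) :
    pvBin m = pvBin (m / 2) ++ [Nat.digitChar (m % 2)] := by
  rw [pvBin, dif_neg (by omega : ¬ m < 2)]

theorem pvToDigitsCore_eq (f : Nat) : ∀ (m : Nat) (acc : List Char), m ≤ f →
    Nat.toDigitsCore 2 (f + 1) m acc = pvBin m ++ acc := by
  induction f with
  | zero =>
    intro m acc hm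
    interval_cases m
    simp [Nat.toDigitsCore, pvBin_lt 0 (by omega), Nat.digitChar]
  | succ f ih =>
    intro m acc hm
    rw [Nat.toDigitsCore]
    by_cases h2 : m < 2
    · have h0 : m / 2 = 0 := by omega
      have hm2 : m % 2 = m := by omega
      rw [pvBin_lt m h2]
      simp [h0, hm2]
    · have hne : ¬ m / 2 = 0 := by omega
      simp only [hne, if_false]
      rw [ih (m / 2) _ (by omega), pvBin_two m (by omega)]
      simp

theorem pvToDigits_eq (m : Nat) : Nat.toDigits 2 m = pvBin m := by
  simpa [Nat.toDigits] using pvToDigitsCore_eq m m [] le_rfl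

-- render on a natural number reads off pvBin through trChar
theorem render_natCast (m : Nat) : render ((m : Nat) : Int) = (pvBin m).map trChar := by
  induction m using Nat.strong_induction_on with
  | _ m ih =>
    rw [render]
    have hnn : ¬ ((m : Int) < 0) := by omega
    rw [dif_neg hnn]
    by_cases h2 : m < 2
    · rw [dif_pos (by exact_mod_cast h2), pvBin_lt m h2]
      interval_cases m <;> decide
    · have h2' : ¬ ((m : Int) < 2) := by exact_mod_cast h2
      rw [dif_neg h2', pvBin_two m (by omega)]
      have hfd : PySem.Int.floordiv ((m : Nat) : Int) 2 = (((m / 2 : Nat)) : Int) := by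
        exact_mod_cast PySem.Int.floordiv_natCast m 2
      rw [hfd, ih (m / 2) (Nat.div_lt_self (by omega) (by omega))]
      have hmod : PySem.Int.mod ((m : Nat) : Int) 2 = (((m % 2 : Nat)) : Int) := by
        exact_mod_cast PySem.Int.mod_natCast m 2
      rw [List.map_append, hmod]
      have : m % 2 = 0 ∨ m % 2 = 1 := by omega
      rcases this with h | h <;> simp [h, trChar] <;> decide

-- render is A's formatted numeral pushed through the replace symbol map
theorem render_eq (v : Int) : render v = (PySem.Int.toBinChars v).map trChar := by
  by_cases hv : v < 0
  · rw [render, dif_pos hv, PySem.Int.toBinChars, if_pos hv]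
    have hneg : -v = ((v.natAbs : Nat) : Int) := by omega
    rw [hneg, render_natCast, pvToDigits_eq]
    simp [trChar]
  · rw [PySem.Int.toBinChars, if_neg hv, pvToDigits_eq, ← render_natCast]
    congr 1
    omega

-- single-character replace is a map
theorem pvReplaceGo (o nw : Char) : ∀ (l acc : List Char) (f : Nat), l.length ≤ f →
    PySem.Chars.replace.go [o] [nw] f l acc
      = acc.reverse ++ l.map (fun c => if c = o then nw else c) := by
  intro l
  induction l with
  | nil =>
    intro acc f _
    cases f <;> simp [PySem.Chars.replace.go]
  | cons c t ih =>
    intro acc f hf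
    match f, hf with
    | f + 1, hf =>
      rw [PySem.Chars.replace.go]
      by_cases hco : c = o
      · have hpre : List.isPrefixOf [o] (c :: t) = true := by
          simp [List.isPrefixOf, hco]
        simp only [hpre, if_true, List.length_singleton, List.drop_succ_cons, List.drop_zero,
          List.reverse_singleton]
        rw [show [nw] ++ acc = nw :: acc from rfl,
          ih (nw :: acc) f (by simpa using Nat.le_of_succ_le_succ hf)]
        simp [hco]
      · have hpre : List.isPrefixOf [o] (c :: t) = false := by
          simp [List.isPrefixOf]
          exact fun h => absurd h.symm hco
        simp only [hpre, Bool.false_eq_true, if_false]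
        rw [ih (c :: acc) f (by simpa using Nat.le_of_succ_le_succ hf)]
        simp [hco]

theorem pvReplace_single (o nw : Char) (l : List Char) :
    PySem.Chars.replace l [o] [nw] = l.map (fun c => if c = o then nw else c) := by
  rw [PySem.Chars.replace]
  simp only [List.isEmpty_cons, Bool.false_eq_true, if_false]
  simpa using pvReplaceGo o nw l [] l.length le_rfl

-- A's two replaces compose to trChar
theorem pvReplace_pair (l : List Char) :
    PySem.Chars.replace (PySem.Chars.replace l ['1'] ['#']) ['0'] [' '] = l.map trChar := by
  rw [pvReplace_single, pvReplace_single, List.map_map]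
  apply List.map_congr_left
  intro c _
  by_cases h1 : c = '1'
  · simp [h1, trChar]
  · by_cases h0 : c = '0' <;> simp [h0, h1, trChar]

-- the per-row equality: A's formatted, padded and replaced row is B's space-justified render
theorem pvRow (n : Int) (v : Int) :
    PySem.Chars.replace (PySem.Chars.replace
        (if ((PySem.Int.toBinChars v).length : Int) < n then
            List.replicate (n - ((PySem.Int.toBinChars v).length : Int)).toNat '0'
              ++ PySem.Int.toBinChars v
          else PySem.Int.toBinChars v) ['1'] ['#']) ['0'] [' ']
      = List.replicate (n - ((render v).length : Int)).toNat ' ' ++ render v := by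
  have hpad : (if ((PySem.Int.toBinChars v).length : Int) < n then
        List.replicate (n - ((PySem.Int.toBinChars v).length : Int)).toNat '0'
          ++ PySem.Int.toBinChars v
      else PySem.Int.toBinChars v)
      = List.replicate (n - ((PySem.Int.toBinChars v).length : Int)).toNat '0'
          ++ PySem.Int.toBinChars v := by
    split_ifs with hc
    · rfl
    · have h0 : (n - ((PySem.Int.toBinChars v).length : Int)).toNat = 0 := by omega
      rw [h0]; simp
  rw [hpad, pvReplace_pair, List.map_append, List.map_replicate, render_eq,
    List.length_map]
  rfl

-- ===== VERDICT (by name: the statement is the Claim_ definition above) =====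
theorem solution_spec : Claim_equal_solution := by
  intro n arr1 arr2 _hd hpre
  unfold Pre_solution at hpre
  unfold Spec_solution solution solution_alt
  simp only [PySem.List.len_eq, PySem.List.foldl_append_singleton_eq_map, List.nil_append]
  rw [List.map_map, PySem.List.pyRange_zero_nat arr1.length, List.map_map]
  apply List.ext_getElem
  · simp
    omega
  · intro i hi1 hi2
    simp only [List.getElem_map, List.getElem_range, Function.comp_apply, List.getElem_zip]
    have hi : i < arr1.length := by simpa using hi1
    have hi2' : i < arr2.length := by omega
    have hg1 : PySem.List.pyGetD arr1 ((i : Nat) : Int) 0 = arr1[i] := by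
      rw [PySem.List.pyGetD_natCast]
      simp [List.getD, hi]
    have hg2 : PySem.List.pyGetD arr2 ((i : Nat) : Int) 0 = arr2[i] := by
      rw [PySem.List.pyGetD_natCast]
      simp [List.getD, hi2']
    rw [hg1, hg2]
    exact congrArg String.mk (pvRow n (PySem.Int.bor arr1[i] arr2[i]))
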